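-- pv_equiv track=rewrite | github.com/laggykiller/sticker-convert | src/sticker_convert/utils/media/decrypt_kakao.py | generate_lfsr
-- ===== SOURCE A (Python) =====
-- from typing import List
--
-- def generate_lfsr(key: str) -> List[int]:
--     d = list(key * 2)
--     seq = [0, 0, 0]
--
--     seq[0] = 301989938
--     seq[1] = 623357073
--     seq[2] = -2004086252
--
--     i = 0
--
--     for i in range(0, 4):
--         seq[0] = ord(d[i]) | (seq[0] << 8)
--         seq[1] = ord(d[4 + i]) | (seq[1] << 8)
--         seq[2] = ord(d[8 + i]) | (seq[2] << 8)
--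
--     seq[0] = seq[0] & 0xFFFFFFFF
--     seq[1] = seq[1] & 0xFFFFFFFF
--     seq[2] = seq[2] & 0xFFFFFFFF
--
--     return seq
-- ===== SOURCE B (Python) =====
-- from typing import List
--
--
-- def generate_lfsr(key: str) -> List[int]:
--     s = key * 2
--     n = 0
--     for i in range(12):
--         n = n * 256 + ord(s[i])
--     return [(n >> 64) & 0xFFFFFFFF, (n >> 32) & 0xFFFFFFFF, n & 0xFFFFFFFF]
-- ===== Notes on version B (the rewrite author's own statement) =====
-- stated objective: alternative
-- what changed: Instead of three parallel seeded shift/OR accumulators updated in a 4-step loop, B folds the 12 relevant characters of key*2 into a single 96-bit big-endian integer with one accumulator and then slices out the three 32-bit words by shifting and masking; the seed constants vanish because the final mask discards them.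
import Mathlib
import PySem

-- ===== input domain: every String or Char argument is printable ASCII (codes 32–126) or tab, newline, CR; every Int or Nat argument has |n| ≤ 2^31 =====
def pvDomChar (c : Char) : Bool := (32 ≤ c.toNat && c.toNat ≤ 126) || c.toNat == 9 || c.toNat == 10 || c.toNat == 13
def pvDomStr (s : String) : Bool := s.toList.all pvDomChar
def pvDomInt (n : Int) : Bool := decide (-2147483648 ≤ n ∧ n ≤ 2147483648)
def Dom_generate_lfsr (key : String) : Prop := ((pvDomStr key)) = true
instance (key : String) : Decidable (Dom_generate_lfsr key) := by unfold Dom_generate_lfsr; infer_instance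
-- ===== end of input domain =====

-- B replaces A's three parallel seeded shift/OR accumulators by ONE accumulator folding the 12
-- relevant characters into a single 96-bit big-endian integer, then slices out the three 32-bit
-- words by shift-and-mask (the seed constants are masked away); objective: alternative.

-- ord(xs[i]); Pre_ guarantees every index used is in range (Python raises IndexError on a
-- shorter key, and those inputs are outside Pre_, so the default ' ' is never reached)
def pvOrdAt (d : List Char) (i : Int) : Int := ((PySem.List.pyGetD d i ' ').toNat : Int)

-- ===== PORT A =====
def generate_lfsr (key : String) : List Int :=
  let d : List Char := key.toList ++ key.toList
  let seq : Int × Int × Int :=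
    (PySem.List.pyRange 0 4 1).foldl
      (fun (s : Int × Int × Int) i =>
        (PySem.Int.bor (pvOrdAt d i) (s.1 <<< (8 : Nat)),
         PySem.Int.bor (pvOrdAt d (4 + i)) (s.2.1 <<< (8 : Nat)),
         PySem.Int.bor (pvOrdAt d (8 + i)) (s.2.2 <<< (8 : Nat))))
      (301989938, 623357073, -2004086252)
  [PySem.Int.band seq.1 0xFFFFFFFF, PySem.Int.band seq.2.1 0xFFFFFFFF, PySem.Int.band seq.2.2 0xFFFFFFFF]

-- ===== PORT B =====
def generate_lfsr_alt (key : String) : List Int :=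
  let s : List Char := key.toList ++ key.toList
  let n : Int :=
    (PySem.List.pyRange 0 12 1).foldl (fun (n : Int) i => n * 256 + pvOrdAt s i) 0
  [PySem.Int.band (n >>> (64 : Nat)) 0xFFFFFFFF,
   PySem.Int.band (n >>> (32 : Nat)) 0xFFFFFFFF,
   PySem.Int.band n 0xFFFFFFFF]

-- ===== PRECONDITION & SPEC =====
-- A indexes (key*2)[11], so it raises IndexError exactly when len(key) < 6; only those inputs are excluded.
def Pre_generate_lfsr (key : String) : Prop := 6 ≤ key.toList.length
instance (key : String) : Decidable (Pre_generate_lfsr key) := by unfold Pre_generate_lfsr; infer_instance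
def pvWitness_generate_lfsr : String := "abcdef"

def Spec_generate_lfsr (key : String) (out : List Int) : Prop := out = generate_lfsr_alt key
instance (key : String) (out : List Int) : Decidable (Spec_generate_lfsr key out) := by unfold Spec_generate_lfsr; infer_instance

-- ===== CLAIM (what is proved, stated in full; the proofs are below) =====
def Claim_equal_generate_lfsr : Prop := ∀ (key : String), Dom_generate_lfsr key → Pre_generate_lfsr key → Spec_generate_lfsr key (generate_lfsr key)

-- ===== LEMMAS AND PROOFS =====

-- disjoint-bit OR as addition on Nat: a low byte OR'd into a number with a clear low byte
theorem nat_or_mul256 (c x : Nat) (h : c < 256) : c ||| x * 256 = x * 256 + c := by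
  have h8 : c < 2 ^ 8 := h
  apply Nat.eq_of_testBit_eq
  intro i
  have hx : x * 256 = 2 ^ 8 * x := by ring
  rw [Nat.testBit_or, hx, Nat.testBit_two_pow_mul_add x h8 i, Nat.testBit_two_pow_mul]
  by_cases hi : i < 8
  · simp [hi, Nat.not_le.mpr hi]
  · have hle : 2 ^ 8 ≤ 2 ^ i := Nat.pow_le_pow_right (by norm_num) (Nat.not_lt.mp hi)
    have hci : c < 2 ^ i := Nat.lt_of_lt_of_le h8 hle
    simp [hi, Nat.not_lt.mp hi, Nat.testBit_lt_two_pow hci]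

-- m*256 - 1 has all of bits 0..7 set, so AND with a byte value is the identity
theorem nat_and_lowones (c m : Nat) (h : c < 256) (hm : 1 ≤ m) : (m * 256 - 1) &&& c = c := by
  have h8 : (255 : Nat) < 2 ^ 8 := by norm_num
  have hd : m * 256 - 1 = 2 ^ 8 * (m - 1) + 255 := by omega
  apply Nat.eq_of_testBit_eq
  intro i
  rw [Nat.testBit_land, hd, Nat.testBit_two_pow_mul_add (m - 1) h8 i]
  by_cases hi : i < 8
  · have h255 : (255 : Nat).testBit i = true := by
      have : (255 : Nat) = 2 ^ 8 - 1 := by norm_num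
      rw [this, Nat.testBit_two_pow_sub_one]
      simp [hi]
    simp [hi, h255]
  · have hle : 2 ^ 8 ≤ 2 ^ i := Nat.pow_le_pow_right (by norm_num) (Nat.not_lt.mp hi)
    have hci : c < 2 ^ i := Nat.lt_of_lt_of_le h hle
    simp [Nat.testBit_lt_two_pow hci]

-- Python's  c | (x << 8)  equals  x*256 + c  for a byte value c, for EITHER sign of x
theorem pv_bor_shift (x c : Int) (h0 : 0 ≤ c) (h1 : c < 256) :
    PySem.Int.bor c (x <<< (8 : Nat)) = x * 256 + c := by
  rw [Int.shiftLeft_eq]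
  show PySem.Int.bor c (x * 2 ^ 8) = x * 256 + c
  unfold PySem.Int.bor
  by_cases hx : 0 ≤ x
  · have hb : (0 : Int) ≤ x * 2 ^ 8 := by positivity
    rw [if_pos h0, if_pos hb]
    have ht : (x * 2 ^ 8).toNat = x.toNat * 256 := by omega
    rw [ht, nat_or_mul256 c.toNat x.toNat (by omega)]
    omega
  · have hx' : x < 0 := by omega
    have hb : ¬ (0 : Int) ≤ x * 2 ^ 8 := by nlinarith
    rw [if_pos h0, if_neg hb]
    have hm1 : 1 ≤ (-x).toNat := by omega
    have ht : (-(x * 2 ^ 8) - 1).toNat = (-x).toNat * 256 - 1 := by omega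
    rw [ht, nat_and_lowones c.toNat (-x).toNat (by omega) hm1]
    omega

-- Python's  y & 0xFFFFFFFF  equals  y mod 2^32  for EITHER sign of y
theorem pv_band_mask (y : Int) : PySem.Int.band y 0xFFFFFFFF = y % 4294967296 := by
  unfold PySem.Int.band
  have h255 : (0xFFFFFFFF : Int).toNat = 2 ^ 32 - 1 := by rfl
  by_cases hy : 0 ≤ y
  · rw [if_pos hy, if_pos (by norm_num : (0 : Int) ≤ 0xFFFFFFFF)]
    rw [h255, Nat.and_two_pow_sub_one_eq_mod]
    omega
  · rw [if_neg hy, if_pos (by norm_num : (0 : Int) ≤ 0xFFFFFFFF)]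
    rw [h255, Nat.and_comm, Nat.and_two_pow_sub_one_eq_mod]
    have : (-y - 1).toNat % 2 ^ 32 < 2 ^ 32 := Nat.mod_lt _ (by norm_num)
    omega

-- on Dom every character read (default included) is a byte value
theorem pv_ordAt_bounds (d : List Char) (h : ∀ c ∈ d, c.toNat < 256) (i : Int) :
    0 ≤ pvOrdAt d i ∧ pvOrdAt d i < 256 := by
  unfold pvOrdAt PySem.List.pyGetD
  cases hg : PySem.List.pyGet? d i with
  | none => simp
  | some c =>
    have hc : c ∈ d := by
      unfold PySem.List.pyGet? at hg
      cases hk : PySem.List.pyIdx? d.length i with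
      | none => simp [hk] at hg
      | some k =>
        rw [hk] at hg
        simp at hg
        exact List.mem_of_getElem? hg
    have := h c hc
    simp
    omega

-- ===== VERDICT (by name: the statement is the Claim_ definition above) =====
theorem generate_lfsr_spec : Claim_equal_generate_lfsr := by
  intro key hdom _hpre
  unfold Spec_generate_lfsr
  have hlt : ∀ c ∈ key.toList ++ key.toList, c.toNat < 256 := by
    intro c hc
    have hc' : c ∈ key.toList := by
      rcases List.mem_append.mp hc with h | h <;> exact h
    have := List.all_eq_true.mp hdom c hc'
    simp [pvDomChar] at this
    omega
  have hb := pv_ordAt_bounds _ hlt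
  have hr4 : PySem.List.pyRange 0 4 1 = [0, 1, 2, 3] := by decide
  have hr12 : PySem.List.pyRange 0 12 1 = [0, 1, 2, 3, 4, 5, 6, 7, 8, 9, 10, 11] := by decide
  unfold generate_lfsr generate_lfsr_alt
  rw [hr4, hr12]
  simp only [List.foldl]
  simp only [pv_bor_shift _ _ (hb _).1 (hb _).2, pv_band_mask,
    Int.shiftRight_eq_div_pow]
  norm_num
  simp only [pvOrdAt] at hb ⊢
  have h0 := hb 0
  have h1 := hb 1
  have h2 := hb 2
  have h3 := hb 3
  have h4 := hb 4
  have h5 := hb 5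
  have h6 := hb 6
  have h7 := hb 7
  have h8 := hb 8
  have h9 := hb 9
  have h10 := hb 10
  have h11 := hb 11
  refine ⟨?_, ?_, ?_⟩ <;> omega
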